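-- pv_equiv track=rewrite | github.com/agneus/python-templates | dp/permutation_sum.py | permutation_sum_memo
-- ===== SOURCE A (Python) =====
-- def permutation_sum_memo(coins, target):
--     memo = {}
--
--     def helper(amount):
--         if amount < 0:
--             return 0
--         if amount == 0:
--             return 1
--         if amount in memo:
--             return memo[amount]
--
--         total_ways = 0
--         for coin in coins:
--             total_ways += helper(amount - coin)
--
--         memo[amount] = total_ways
--         return total_ways
--
--     return helper(target)
-- ===== SOURCE B (Python) =====
-- def permutation_sum_memo(coins, target):
--     if target < 0:
--         return 0
--     dp = [1]
--     for amount in range(1, target + 1):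
--         total = 0
--         for coin in coins:
--             if 0 < coin <= amount:
--                 total += dp[amount - coin]
--         dp.append(total)
--     return dp[target]
-- ===== Notes on version B (the rewrite author's own statement) =====
-- stated objective: alternative
-- what changed: Replaced the top-down memoized recursion (closure + dict) with an iterative bottom-up DP list filled in increasing order of amount (no recursion, no dict); it trades A's visit of only reachable amounts for a full table, so it is not faster on sparse-coin inputs.
-- outside the precondition, e.g. on permutation_sum_memo([1000], 1000000): A returns 1, B returns 1; on permutation_sum_memo([0], 1): A raises RecursionError, B returns 0
import Mathlib
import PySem

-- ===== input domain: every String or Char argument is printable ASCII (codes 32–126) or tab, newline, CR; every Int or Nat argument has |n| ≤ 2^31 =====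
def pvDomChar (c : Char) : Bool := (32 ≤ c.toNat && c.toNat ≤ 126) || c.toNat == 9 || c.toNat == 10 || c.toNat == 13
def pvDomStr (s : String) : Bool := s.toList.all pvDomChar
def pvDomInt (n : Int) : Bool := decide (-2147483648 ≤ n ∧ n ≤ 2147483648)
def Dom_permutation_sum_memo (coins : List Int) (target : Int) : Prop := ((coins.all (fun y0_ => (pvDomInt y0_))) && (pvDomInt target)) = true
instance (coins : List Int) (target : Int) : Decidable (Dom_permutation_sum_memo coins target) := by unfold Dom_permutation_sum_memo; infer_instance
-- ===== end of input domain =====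

-- B replaces A's memoized top-down recursion by an iterative bottom-up DP table; equal return value on Pre_.

-- B replaces A's memoized top-down recursion by an iterative bottom-up DP table; equal return value on Pre_.

-- ===== PORT A =====
-- A's inner 'helper' with the memo dict threaded through (ported as a hash map:
-- lookup/insert semantics agree with Python's dict for Int keys); 'fuel' only
-- makes the recursion total in Lean (under Pre_ the fuel target.toNat + 1 is
-- never exhausted).
def pvHelperA (coins : List Int) : Nat → Int → Std.HashMap Int Int → Int × Std.HashMap Int Int
  | 0, _, memo => (0, memo)
  | fuel + 1, amount, memo =>
    if amount < 0 then (0, memo)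
    else if amount = 0 then (1, memo)
    else
      match memo[amount]? with
      | some v => (v, memo)
      | none =>
        let r := coins.foldl (fun (acc : Int × Std.HashMap Int Int) coin =>
          let p := pvHelperA coins fuel (amount - coin) acc.2
          (acc.1 + p.1, p.2)) (0, memo)
        (r.1, r.2.insert amount r.1)

def permutation_sum_memo (coins : List Int) (target : Int) : Int :=
  (pvHelperA coins (target.toNat + 1) target Std.HashMap.emptyWithCapacity).1

-- ===== PORT B =====
-- dp is the Python list built by append; ported as Array.push.
def permutation_sum_memo_alt (coins : List Int) (target : Int) : Int :=
  if target < 0 then 0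
  else
    let dp := (PySem.List.pyRange 1 (target + 1) 1).foldl
      (fun (dp : Array Int) amount =>
        dp.push (coins.foldl (fun s coin =>
          if 0 < coin ∧ coin ≤ amount then s + dp.getD (amount - coin).toNat 0 else s) 0))
      #[1]
    dp.getD target.toNat 0

-- ===== PRECONDITION & SPEC =====
-- Pre_ excludes (1) inputs (target > 0 with some coin ≤ 0) on which A's recursion
-- never terminates and Python raises RecursionError, and (2) inputs whose recursion
-- depth (about target / smallest coin) approaches CPython's recursion limit, where A
-- raises RecursionError under the default limit and the port cannot be evaluated.
def Pre_permutation_sum_memo (coins : List Int) (target : Int) : Prop :=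
  target ≤ 0 ∨ ∀ c ∈ coins, 0 < c ∧ target < 900 * c
instance (coins : List Int) (target : Int) : Decidable (Pre_permutation_sum_memo coins target) := by unfold Pre_permutation_sum_memo; infer_instance

def pvWitness_permutation_sum_memo : List Int × Int := ([1, 2], 5)

def Spec_permutation_sum_memo (coins : List Int) (target : Int) (out : Int) : Prop := out = permutation_sum_memo_alt coins target
instance (coins : List Int) (target : Int) (out : Int) : Decidable (Spec_permutation_sum_memo coins target out) := by unfold Spec_permutation_sum_memo; infer_instance

-- ===== CLAIM (what is proved, stated in full; the proofs are below) =====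
def Claim_equal_permutation_sum_memo : Prop := ∀ (coins : List Int) (target : Int), Dom_permutation_sum_memo coins target → Pre_permutation_sum_memo coins target → Spec_permutation_sum_memo coins target (permutation_sum_memo coins target)

-- ===== LEMMAS AND PROOFS =====

-- The mathematical count both programs compute: number of ordered sequences of
-- (positive) coins summing to n.
def gCount (coins : List Int) : Nat → Int
  | 0 => 1
  | n + 1 =>
    (coins.map (fun c =>
      if h : 0 < c ∧ c ≤ ((n : Int) + 1) then gCount coins (n + 1 - c.toNat) else 0)).sum
termination_by n => n
decreasing_by omega

def pvG (coins : List Int) (a : Int) : Int := if a < 0 then 0 else gCount coins a.toNat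

def pvInvM (coins : List Int) (memo : Std.HashMap Int Int) : Prop :=
  ∀ k v, memo[k]? = some v → v = pvG coins k

theorem pv_getD_push (arr : Array Int) (x : Int) (i : Nat) :
    (arr.push x).getD i 0 = if i = arr.size then x else arr.getD i 0 := by
  rcases Nat.lt_trichotomy i arr.size with h | h | h
  · rw [if_neg (by omega)]
    simp [Array.getD, Array.size_push, Array.getElem_push, h, Nat.lt_succ_of_lt h]
  · subst h
    simp [Array.getD, Array.size_push, Array.getElem_push]
  · rw [if_neg (by omega), Array.getD, Array.getD,
        dif_neg (by simp [Array.size_push]; omega), dif_neg (by omega)]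

theorem gCount_spec (coins : List Int) (n : Nat) (h : 0 < n) :
    gCount coins n = (coins.map (fun c =>
      if 0 < c ∧ c ≤ (n : Int) then gCount coins (n - c.toNat) else 0)).sum := by
  cases n with
  | zero => omega
  | succ m =>
    rw [gCount]
    congr 1

-- ---- A-side ----
theorem foldA (coins : List Int) (f : Nat)
    (IH : ∀ (amount : Int) (memo : Std.HashMap Int Int), pvInvM coins memo → amount < (f:Int) →
      (pvHelperA coins f amount memo).1 = pvG coins amount ∧
      pvInvM coins (pvHelperA coins f amount memo).2) :
    ∀ (cs : List Int), (∀ c ∈ cs, 0 < c) → ∀ (amount : Int), 0 < amount → amount ≤ (f:Int) →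
    ∀ (s : Int) (memo : Std.HashMap Int Int), pvInvM coins memo →
      ((cs.foldl (fun (acc : Int × Std.HashMap Int Int) coin =>
          let p := pvHelperA coins f (amount - coin) acc.2
          (acc.1 + p.1, p.2)) (s, memo)).1
        = s + (cs.map (fun c => pvG coins (amount - c))).sum ∧
       pvInvM coins ((cs.foldl (fun (acc : Int × Std.HashMap Int Int) coin =>
          let p := pvHelperA coins f (amount - coin) acc.2
          (acc.1 + p.1, p.2)) (s, memo)).2)) := by
  intro cs
  induction cs with
  | nil => intro _ amount _ _ s memo hinv; exact ⟨by simp, hinv⟩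
  | cons c cs ihc =>
    intro hpos amount ham hf s memo hinv
    have hc : 0 < c := hpos c (List.mem_cons_self)
    have hlt : amount - c < (f:Int) := by omega
    obtain ⟨hv, hinv'⟩ := IH (amount - c) memo hinv hlt
    simp only [List.foldl_cons, List.map_cons, List.sum_cons]
    obtain ⟨h1, h2⟩ := ihc (fun x hx => hpos x (List.mem_cons_of_mem _ hx)) amount ham hf
      (s + (pvHelperA coins f (amount - c) memo).1) (pvHelperA coins f (amount - c) memo).2 hinv'
    refine ⟨?_, h2⟩
    rw [h1, hv]
    ring

theorem helperA_correct (coins : List Int) (hpos : ∀ c ∈ coins, 0 < c) :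
    ∀ (fuel : Nat) (amount : Int) (memo : Std.HashMap Int Int),
      pvInvM coins memo → amount < (fuel : Int) →
      (pvHelperA coins fuel amount memo).1 = pvG coins amount ∧
      pvInvM coins (pvHelperA coins fuel amount memo).2 := by
  intro fuel
  induction fuel with
  | zero =>
    intro amount memo hinv hlt
    have : amount < 0 := by exact_mod_cast hlt
    simp [pvHelperA, pvG, this]
    exact hinv
  | succ f ih =>
    intro amount memo hinv hlt
    by_cases h0 : amount < 0
    · simp [pvHelperA, h0, pvG]
      exact hinv
    by_cases h1 : amount = 0
    · subst h1
      simp [pvHelperA, pvG, gCount]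
      exact hinv
    have hampos : 0 < amount := by omega
    cases hm : memo[amount]? with
    | some v =>
      simp only [pvHelperA, if_neg h0, if_neg h1, hm]
      exact ⟨hinv _ _ hm, hinv⟩
    | none =>
      simp only [pvHelperA, if_neg h0, if_neg h1, hm]
      obtain ⟨hv, hinv'⟩ := foldA coins f ih coins hpos amount hampos (by push_cast at hlt ⊢; omega)
        0 memo hinv
      have hsum : (0:Int) + (coins.map (fun c => pvG coins (amount - c))).sum = pvG coins amount := by
        rw [zero_add]
        unfold pvG
        rw [if_neg h0, gCount_spec coins amount.toNat (by omega)]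
        apply congrArg List.sum
        apply List.map_congr_left
        intro c hcmem
        have hc : 0 < c := hpos c hcmem
        by_cases hle : c ≤ amount
        · rw [if_neg (by omega : ¬ amount - c < 0),
              if_pos ⟨hc, by omega⟩]
          congr 1
          omega
        · rw [if_pos (by omega : amount - c < 0),
              if_neg (by intro ⟨h1', h2'⟩; omega)]
      constructor
      · simpa [hsum] using hv
      · intro k v hk
        rw [Std.HashMap.getElem?_insert] at hk
        rcases eq_or_ne amount k with rfl | hne
        · rw [if_pos (by simp)] at hk
          rw [← Option.some_inj.mp hk, hv, hsum]
        · rw [if_neg (by simpa using hne)] at hk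
          exact hinv' k v hk

-- ---- B-side ----
theorem B_inner (coins : List Int) (amount : Int) (dp : Array Int)
    (hsz : dp.size = amount.toNat)
    (hdp : ∀ i, i < dp.size → dp.getD i 0 = gCount coins i) :
    ∀ (cs : List Int) (s : Int),
      cs.foldl (fun s coin =>
          if 0 < coin ∧ coin ≤ amount then s + dp.getD (amount - coin).toNat 0 else s) s
        = s + (cs.map (fun c =>
            if 0 < c ∧ c ≤ amount then gCount coins (amount.toNat - c.toNat) else 0)).sum := by
  intro cs
  induction cs with
  | nil => intro s; simp
  | cons c cs ihc =>
    intro s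
    simp only [List.foldl_cons, List.map_cons, List.sum_cons]
    by_cases hc : 0 < c ∧ c ≤ amount
    · obtain ⟨hc1, hc2⟩ := hc
      have hrd : (amount - c).toNat < dp.size := by omega
      rw [if_pos ⟨hc1, hc2⟩, if_pos ⟨hc1, hc2⟩, ihc, hdp (amount - c).toNat hrd,
          show (amount - c).toNat = amount.toNat - c.toNat by omega]
      ring
    · rw [if_neg hc, if_neg hc, ihc, zero_add]

theorem B_outer (coins : List Int) :
    ∀ k : Nat,
    (((PySem.List.pyRange 1 (1 + (k:Int)) 1).foldl
        (fun (dp : Array Int) amount =>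
          dp.push (coins.foldl (fun s coin =>
            if 0 < coin ∧ coin ≤ amount then s + dp.getD (amount - coin).toNat 0 else s) 0))
        #[1]).size = k + 1 ∧
     ∀ i, i < k + 1 →
      ((PySem.List.pyRange 1 (1 + (k:Int)) 1).foldl
        (fun (dp : Array Int) amount =>
          dp.push (coins.foldl (fun s coin =>
            if 0 < coin ∧ coin ≤ amount then s + dp.getD (amount - coin).toNat 0 else s) 0))
        #[1]).getD i 0 = gCount coins i) := by
  intro k
  induction k with
  | zero =>
    rw [show (1 + ((0:Nat):Int)) = 1 by norm_num,
        PySem.List.pyRange_one_eq_nil le_rfl, List.foldl_nil]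
    refine ⟨rfl, fun i hi => ?_⟩
    interval_cases i
    simp [gCount, Array.getD]
  | succ k ih =>
    obtain ⟨hl, hg⟩ := ih
    rw [show (1 + ((k+1:Nat):Int)) = (1 + (k:Int)) + 1 by omega,
        PySem.List.pyRange_one_succ_right (by omega), List.foldl_append, List.foldl_cons,
        List.foldl_nil]
    have htn : ((1:Int) + (k:Int)).toNat = k + 1 := by omega
    refine ⟨by rw [Array.size_push, hl], fun i hi => ?_⟩
    rw [pv_getD_push, hl]
    rcases eq_or_ne i (k+1) with rfl | hne
    · rw [if_pos rfl,
          B_inner coins (1 + (k:Int)) _ (by rw [hl, htn]) (fun j hj => hg j (by omega)) coins 0,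
          zero_add, htn, gCount_spec coins (k+1) (by omega)]
      apply congrArg List.sum
      apply List.map_congr_left
      intro c _
      have hcast : ((k+1:Nat):Int) = 1 + (k:Int) := by omega
      rw [hcast]
    · rw [if_neg hne]
      exact hg i (by omega)

theorem alt_eq_g (coins : List Int) (target : Int) :
    permutation_sum_memo_alt coins target = pvG coins target := by
  unfold permutation_sum_memo_alt pvG
  by_cases ht : target < 0
  · simp [ht]
  · rw [if_neg ht, if_neg ht]
    have h2 : target + 1 = 1 + ((target.toNat : Nat) : Int) := by omega
    rw [h2]
    obtain ⟨hl, hg⟩ := B_outer coins target.toNat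
    exact hg target.toNat (by omega)

-- ===== VERDICT (by name: the statement is the Claim_ definition above) =====
theorem permutation_sum_memo_spec : Claim_equal_permutation_sum_memo := by
  intro coins target _ hpre
  unfold Spec_permutation_sum_memo
  rw [alt_eq_g]
  unfold permutation_sum_memo
  rcases hpre with hle | hpos
  · rcases lt_or_eq_of_le hle with hlt | heq
    · simp [pvHelperA, hlt, pvG]
    · subst heq; simp [pvHelperA, pvG, gCount]
  · exact (helperA_correct coins (fun c hc => (hpos c hc).1) _ target Std.HashMap.emptyWithCapacity
      (by intro k v h; simp at h) (by omega)).1
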